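-- pv_equiv track=rewrite | github.com/ashomidi/spendings | main.py | determine_payments
-- ===== SOURCE A (Python) =====
-- def determine_payments(payments):
--     transactions = []
--     for idx, payment in enumerate(payments):
--         if payment > 0:
--             for i in range(idx):
--                 if payments[i] < 0:
--                     amount = min(abs(payments[i]), payment)
--                     transactions.append((i + 1, idx + 1, amount))
--                     payment -= amount
--                     payments[i] += amount
--                     if payment == 0:
--                         break
--     return transactions
-- ===== SOURCE B (Python) =====
-- def determine_payments(payments):
--     # Queue of outstanding creditors consumed from the front by each payer.
--     # Unlike A, B does not mutate `payments`; the returned list is identical.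
--     transactions = []
--     creditors = []   # FIFO of (1-based index, remaining debt > 0)
--     head = 0         # creditors[:head] are fully settled
--     for idx, payment in enumerate(payments):
--         if payment < 0:
--             creditors.append((idx + 1, -payment))
--         elif payment > 0:
--             while head < len(creditors):
--                 ci, debt = creditors[head]
--                 if debt <= payment:
--                     transactions.append((ci, idx + 1, debt))
--                     payment -= debt
--                     head += 1
--                     if payment == 0:
--                         break
--                 else:
--                     transactions.append((ci, idx + 1, payment))
--                     creditors[head] = (ci, debt - payment)
--                     break
--     return transactions
-- ===== Notes on version B (the rewrite author's own statement) =====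
-- stated objective: faster
-- what changed: Replaces A's per-payer rescan of the whole mutated payments prefix by a FIFO queue of outstanding (creditor index, remaining debt) pairs consumed from the front, so each creditor is pushed and retired once; B does not mutate the input list.
import Mathlib
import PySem

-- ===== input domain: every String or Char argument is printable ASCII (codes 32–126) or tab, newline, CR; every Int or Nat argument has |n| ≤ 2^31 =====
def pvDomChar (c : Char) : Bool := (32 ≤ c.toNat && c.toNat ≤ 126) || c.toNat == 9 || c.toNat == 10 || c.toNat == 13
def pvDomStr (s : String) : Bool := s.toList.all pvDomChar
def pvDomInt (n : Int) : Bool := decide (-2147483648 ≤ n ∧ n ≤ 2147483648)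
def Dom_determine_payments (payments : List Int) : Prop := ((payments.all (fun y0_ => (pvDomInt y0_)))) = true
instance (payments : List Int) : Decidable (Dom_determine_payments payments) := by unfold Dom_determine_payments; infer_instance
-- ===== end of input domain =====

-- B replaces A's quadratic rescans of the mutated payments prefix by a FIFO queue of
-- outstanding (creditor index, remaining debt) pairs consumed from the front (O(n)).
-- A mutates `payments` in place, B does not; the theorems are about the return value.

-- ===== PORT A =====
-- inner loop: 'for i in range(idx): ...' with the break on payment == 0.
-- payments[i] is always in range here (i < idx < len), so getD is exact.
def dpAInner (pays : List Int) (idx : Nat) (payment : Int)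
    (tr : List (Int × Int × Int)) : List Nat → (List (Int × Int × Int) × List Int)
  | [] => (tr, pays)
  | i :: rest =>
    let pi := pays.getD i 0
    if pi < 0 then
      let amount := min |pi| payment
      let tr' := tr ++ [((i : Int) + 1, (idx : Int) + 1, amount)]
      let payment' := payment - amount
      let pays' := pays.set i (pi + amount)
      if payment' = 0 then (tr', pays')
      else dpAInner pays' idx payment' tr' rest
    else dpAInner pays idx payment tr rest

-- outer loop: 'for idx, payment in enumerate(payments)' over the live (mutated) list
def dpAOuter (pays : List Int) (tr : List (Int × Int × Int)) :
    List Nat → List (Int × Int × Int)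
  | [] => tr
  | idx :: rest =>
    let payment := pays.getD idx 0
    if payment > 0 then
      let r := dpAInner pays idx payment tr (List.range idx)
      dpAOuter r.2 r.1 rest
    else dpAOuter pays tr rest

def determine_payments (payments : List Int) : List (Int × Int × Int) :=
  dpAOuter payments [] (List.range payments.length)

-- ===== PORT B =====
-- the 'while head < len(creditors)' loop of Source B
def dpQPay (cs : Array (Int × Int)) (head : Nat) (idx : Nat) (payment : Int)
    (tr : List (Int × Int × Int)) : Array (Int × Int) × Nat × List (Int × Int × Int) :=
  if h : head < cs.size then
    let ci := cs[head].1
    let debt := cs[head].2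
    if debt ≤ payment then
      let tr' := tr ++ [(ci, (idx : Int) + 1, debt)]
      let payment' := payment - debt
      if payment' = 0 then (cs, head + 1, tr')
      else dpQPay cs (head + 1) idx payment' tr'
    else (cs.set head (ci, debt - payment), head, tr ++ [(ci, (idx : Int) + 1, payment)])
  else (cs, head, tr)
termination_by cs.size - head
decreasing_by all_goals omega

-- 'for idx, payment in enumerate(payments)': push creditors, pay from the queue front
def dpQOuter : List Int → Nat → Array (Int × Int) → Nat →
    List (Int × Int × Int) → List (Int × Int × Int)
  | [], _, _, _, tr => tr
  | payment :: rest, idx, cs, head, tr =>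
    if payment < 0 then dpQOuter rest (idx + 1) (cs.push ((idx : Int) + 1, -payment)) head tr
    else if payment > 0 then
      let r := dpQPay cs head idx payment tr
      dpQOuter rest (idx + 1) r.1 r.2.1 r.2.2
    else dpQOuter rest (idx + 1) cs head tr

def determine_payments_alt (payments : List Int) : List (Int × Int × Int) :=
  dpQOuter payments 0 #[] 0 []

-- ===== PRECONDITION & SPEC =====
def Spec_determine_payments (payments : List Int) (out : List (Int × Int × Int)) : Prop := out = determine_payments_alt payments
instance (payments : List Int) (out : List (Int × Int × Int)) : Decidable (Spec_determine_payments payments out) := by unfold Spec_determine_payments; infer_instance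

-- ===== CLAIM (what is proved, stated in full; the proofs are below) =====
def Claim_equal_determine_payments : Prop := ∀ (payments : List Int), Dom_determine_payments payments → Spec_determine_payments payments (determine_payments payments)

-- ===== LEMMAS AND PROOFS =====

-- the outstanding-creditor view of A's state: negative entries of pays at the indices l
def negq (pays : List Int) (l : List Nat) : List (Int × Int) :=
  l.filterMap (fun i =>
    if pays.getD i 0 < 0 then some ((i : Int) + 1, -(pays.getD i 0)) else none)

lemma negq_nil (pays : List Int) : negq pays [] = [] := rfl

lemma negq_set_notmem (pays : List Int) (l : List Nat) (i : Nat) (hi : i ∉ l) (v : Int) :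
    negq (pays.set i v) l = negq pays l := by
  unfold negq
  apply List.filterMap_congr
  intro j hj
  have hne : j ≠ i := fun h => hi (h ▸ hj)
  simp [List.getD, List.getElem?_set_ne (Ne.symm hne)]

lemma negq_append (pays : List Int) (l1 l2 : List Nat) :
    negq pays (l1 ++ l2) = negq pays l1 ++ negq pays l2 := by
  simp [negq]

-- Core correspondence: A's scan over l = B's queue consumption, given the queue view
lemma negq_cons (pays : List Int) (i : Nat) (rest : List Nat) :
    negq pays (i :: rest) =
      (if pays.getD i 0 < 0 then [((i : Int) + 1, -(pays.getD i 0))] else []) ++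
        negq pays rest := by
  simp only [negq, List.filterMap_cons]
  split <;> simp_all

lemma drop_set_self_q (l : List (Int × Int)) (n : Nat) (h : n < l.length) (x : Int × Int) :
    (l.set n x).drop n = x :: l.drop (n + 1) := by
  rw [List.drop_eq_getElem_cons (by simpa using h)]
  rw [List.drop_set_of_lt (hnm := by omega)]
  simp

lemma getElem?_of_drop_cons {a : Type} (l : List a) (n : Nat) (x : a) (t : List a)
    (h : l.drop n = x :: t) : l[n]? = some x := by
  have := List.getElem?_drop (xs := l) (i := n) (j := 0)
  rw [h] at this; simpa using this.symm

lemma getD_set_self_q (pays : List Int) (i : Nat) (h : i < pays.length) (v : Int) :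
    (pays.set i v).getD i 0 = v := by
  simp [List.getD, List.getElem?_set_self h]

lemma getD_set_ne_q (pays : List Int) (i j : Nat) (h : j ≠ i) (v : Int) :
    (pays.set i v).getD j 0 = pays.getD j 0 := by
  simp [List.getD, List.getElem?_set_ne (Ne.symm h)]

lemma inner_eq : ∀ (l : List Nat) (pays : List Int) (idx : Nat) (payment : Int)
    (tr : List (Int × Int × Int)) (cs : Array (Int × Int)) (head : Nat),
    l.Nodup → (∀ i ∈ l, i < pays.length) →
    cs.toList.drop head = negq pays l → head ≤ cs.size → 0 < payment →
    (dpAInner pays idx payment tr l).1 = (dpQPay cs head idx payment tr).2.2 ∧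
    (dpQPay cs head idx payment tr).1.toList.drop (dpQPay cs head idx payment tr).2.1 =
      negq (dpAInner pays idx payment tr l).2 l ∧
    (dpQPay cs head idx payment tr).2.1 ≤ (dpQPay cs head idx payment tr).1.size ∧
    (dpAInner pays idx payment tr l).2.length = pays.length ∧
    (∀ j, j ∉ l → (dpAInner pays idx payment tr l).2.getD j 0 = pays.getD j 0) := by
  intro l
  induction l with
  | nil =>
    intro pays idx payment tr cs head _ _ hq hh hp
    have hsz : ¬ head < cs.size := by
      intro hlt
      have hne : cs.toList.drop head ≠ [] := by
        apply List.ne_nil_of_length_pos; simp; omega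
      exact hne (by rw [hq]; rfl)
    rw [dpQPay]
    simp only [dif_neg hsz]
    exact ⟨rfl, by rw [hq]; rfl, hh, rfl, fun j _ => rfl⟩
  | cons i rest ih =>
    intro pays idx payment tr cs head hnd hbound hq hh hp
    have hnd' : rest.Nodup := hnd.of_cons
    have hir : i ∉ rest := (List.nodup_cons.mp hnd).1
    have hilen : i < pays.length := hbound i (by simp)
    by_cases hv : pays.getD i 0 < 0
    · -- creditor at i: it is the head of the queue
      have hqc : cs.toList.drop head =
          ((i : Int) + 1, -(pays.getD i 0)) :: negq pays rest := by
        rw [hq, negq_cons, if_pos hv]; rfl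
      have hlt : head < cs.size := by
        by_contra hc
        have hnil : cs.toList.drop head = [] := List.drop_eq_nil_of_le (by simpa using hc)
        rw [hqc] at hnil; exact (List.cons_ne_nil _ _) hnil
      have hget : cs[head] = ((i : Int) + 1, -(pays.getD i 0)) := by
        have h1 := getElem?_of_drop_cons _ _ _ _ hqc
        rwa [List.getElem?_eq_getElem (by simpa using hlt),
          Array.getElem_toList, Option.some_inj] at h1
      have hdrop1 : cs.toList.drop (head + 1) = negq pays rest := by
        have h := congrArg List.tail hqc
        rw [List.tail_drop] at h; simpa using h
      have hget1 : cs[head].1 = (i : Int) + 1 := by rw [hget]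
      have hget2 : cs[head].2 = -(pays.getD i 0) := by rw [hget]
      have habs : |pays.getD i 0| = -(pays.getD i 0) := abs_of_neg hv
      rw [dpQPay]
      simp only [dpAInner, if_pos hv, dif_pos hlt, hget1, hget2, habs]
      by_cases hle : -(pays.getD i 0) ≤ payment
      · -- creditor fully settled
        have hmin : min (-(pays.getD i 0)) payment = -(pays.getD i 0) := by omega
        rw [hmin]; simp only [if_pos hle]
        have heq0 : pays.getD i 0 + -(pays.getD i 0) = 0 := by ring
        by_cases hz : payment - -(pays.getD i 0) = 0
        · simp only [if_pos hz]
          refine ⟨trivial, ?_, by omega, by simp, ?_⟩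
          · rw [hdrop1, negq_cons, heq0,
              if_neg (by rw [getD_set_self_q pays i hilen]; omega),
              negq_set_notmem pays rest i hir]
            rfl
          · intro j hj
            exact getD_set_ne_q pays i j (fun h => hj (h ▸ List.mem_cons_self ..)) _
        · simp only [if_neg hz]
          have hp' : 0 < payment - -(pays.getD i 0) := by omega
          obtain ⟨h1, h2, h3, h4, h5⟩ := ih (pays.set i (pays.getD i 0 + -(pays.getD i 0)))
            idx (payment - -(pays.getD i 0))
            (tr ++ [((i:Int)+1, (idx:Int)+1, -(pays.getD i 0))])
            cs (head + 1) hnd'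
            (by intro j hj; simpa using hbound j (by simp [hj]))
            (by rw [hdrop1, negq_set_notmem pays rest i hir]) (by omega) hp'
          refine ⟨h1, ?_, h3, by simpa using h4, ?_⟩
          · rw [h2, negq_cons,
              if_neg (by rw [h5 i hir, heq0, getD_set_self_q pays i hilen]; omega)]
            rfl
          · intro j hj
            have hji : j ≠ i := fun h => hj (h ▸ List.mem_cons_self ..)
            rw [h5 j (fun h => hj (List.mem_cons_of_mem _ h)), getD_set_ne_q pays i j hji]
      · -- creditor only partially settled: payment exhausted
        have hmin : min (-(pays.getD i 0)) payment = payment := by omega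
        rw [hmin]; simp only [if_neg hle]
        have hz : payment - payment = 0 := by ring
        simp only [if_pos hz]
        refine ⟨trivial, ?_, by simpa using hlt.le, by simp, ?_⟩
        · have hlen : head < cs.toList.length := by simpa using hlt
          rw [Array.toList_set, drop_set_self_q _ _ hlen, hdrop1, negq_cons,
            if_pos (by rw [getD_set_self_q pays i hilen]; omega),
            negq_set_notmem pays rest i hir, getD_set_self_q pays i hilen]
          have hneg : -(pays.getD i 0 + payment) = -(pays.getD i 0) - payment := by ring
          rw [hneg]
          rfl
        · intro j hj
          exact getD_set_ne_q pays i j (fun h => hj (h ▸ List.mem_cons_self ..)) _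
    · -- non-creditor index: A skips it, queue unchanged
      have hq' : cs.toList.drop head = negq pays rest := by
        rw [hq, negq_cons, if_neg hv]; rfl
      obtain ⟨h1, h2, h3, h4, h5⟩ := ih pays idx payment tr cs head hnd'
        (fun j hj => hbound j (by simp [hj])) hq' hh hp
      simp only [dpAInner, if_neg hv]
      refine ⟨h1, ?_, h3, h4, ?_⟩
      · rw [h2, negq_cons, if_neg (by rw [h5 i hir]; omega)]
        rfl
      · intro j hj
        exact h5 j (fun h => hj (List.mem_cons_of_mem _ h))

lemma getD_eq_drop (pays suffix : List Int) (k j : Nat) (h : pays.drop k = suffix) :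
    pays.getD (k + j) 0 = suffix.getD j 0 := by
  have := (List.getElem?_drop (xs := pays) (i := k) (j := j)).symm
  rw [h] at this
  simp [List.getD, this]

lemma drop_eq_of_agree (xs ys : List Int) (k : Nat) (hlen : xs.length = ys.length)
    (h : ∀ j, k ≤ j → xs.getD j 0 = ys.getD j 0) : xs.drop k = ys.drop k := by
  apply List.ext_getElem?
  intro j
  rw [List.getElem?_drop, List.getElem?_drop]
  by_cases hj : k + j < xs.length
  · have h1 : xs[k + j]? = some (xs.getD (k + j) 0) := by
      simp [List.getD, List.getElem?_eq_getElem hj]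
    have h2 : ys[k + j]? = some (ys.getD (k + j) 0) := by
      simp [List.getD, List.getElem?_eq_getElem (by omega : k + j < ys.length)]
    rw [h1, h2, h (k + j) (by omega)]
  · rw [List.getElem?_eq_none (by omega), List.getElem?_eq_none (by omega)]

-- outer correspondence
lemma outer_eq : ∀ (suffix : List Int) (k : Nat) (pays : List Int)
    (cs : Array (Int × Int)) (head : Nat) (tr : List (Int × Int × Int)),
    k ≤ pays.length → pays.drop k = suffix →
    cs.toList.drop head = negq pays (List.range k) → head ≤ cs.size →
    dpAOuter pays tr (List.range' k suffix.length) = dpQOuter suffix k cs head tr := by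
  intro suffix
  induction suffix with
  | nil => intro k pays cs head tr _ _ _ _; rfl
  | cons p rest ih =>
    intro k pays cs head tr hk hdrop hq hh
    have hklen : k < pays.length := by
      by_contra hc
      have : pays.drop k = [] := List.drop_eq_nil_of_le (by omega)
      rw [hdrop] at this; exact (List.cons_ne_nil _ _) this
    have hpk : pays.getD k 0 = p := by
      have := getD_eq_drop pays (p :: rest) k 0 hdrop
      simpa using this
    have hdrop1 : pays.drop (k + 1) = rest := by
      have h := congrArg List.tail hdrop
      rw [List.tail_drop] at h; simpa using h
    show dpAOuter pays tr (List.range' k (rest.length + 1)) = _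
    rw [List.range'_succ]
    simp only [dpAOuter, dpQOuter, hpk]
    rcases lt_trichotomy p 0 with hneg | hzero | hpos
    · -- creditor: A skips, B pushes
      rw [if_neg (by omega : ¬ p > 0), if_pos hneg]
      refine ih (k + 1) pays (cs.push ((k : Int) + 1, -p)) head tr (by omega) hdrop1 ?_ ?_
      · rw [Array.toList_push, List.drop_append_of_le_length (by simpa using hh), hq,
          List.range_succ, negq_append]
        have : negq pays [k] = [((k : Int) + 1, -p)] := by
          rw [negq_cons, if_pos (by rw [hpk]; exact hneg), hpk, negq_nil]
          simp
        rw [this]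
      · simp; omega
    · -- zero entry: both skip
      subst hzero
      rw [if_neg (by omega : ¬ (0:Int) > 0), if_neg (by omega : ¬ (0:Int) < 0),
        if_neg (by omega : ¬ (0:Int) > 0)]
      refine ih (k + 1) pays cs head tr (by omega) hdrop1 ?_ hh
      rw [hq, List.range_succ, negq_append]
      have : negq pays [k] = [] := by
        rw [negq_cons, if_neg (by rw [hpk]; omega), negq_nil]
        rfl
      simp [this]
    · -- payer: A scans range k, B consumes the queue
      rw [if_pos hpos, if_neg (by omega : ¬ p < 0)]
      simp only [if_pos hpos]
      obtain ⟨h1, h2, h3, h4, h5⟩ := inner_eq (List.range k) pays k p tr cs head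
        (List.nodup_range) (fun i hi => lt_of_lt_of_le (List.mem_range.mp hi) hk)
        hq hh hpos
      rw [← h1]
      refine ih (k + 1) _ _ _ _ (by rw [h4]; omega) ?_ ?_ h3
      · have := drop_eq_of_agree _ pays (k + 1) h4
          (fun j hj => h5 j (by simp [List.mem_range]; omega))
        rw [this, hdrop1]
      · rw [h2, List.range_succ, negq_append]
        have hk0 : (dpAInner pays k p tr (List.range k)).2.getD k 0 = p := by
          rw [h5 k (by simp), hpk]
        have : negq (dpAInner pays k p tr (List.range k)).2 [k] = [] := by
          rw [negq_cons, if_neg (by rw [hk0]; omega), negq_nil]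
          rfl
        simp [this]

-- ===== VERDICT (by name: the statement is the Claim_ definition above) =====
theorem determine_payments_spec : Claim_equal_determine_payments := by
  intro payments _
  show determine_payments payments = determine_payments_alt payments
  unfold determine_payments determine_payments_alt
  rw [List.range_eq_range']
  exact outer_eq payments 0 payments #[] 0 [] (Nat.zero_le _) rfl rfl (Nat.le_refl 0)
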